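-- pv_equiv track=rewrite | github.com/bavla/TQ | TQ.py | renumPart
-- ===== SOURCE A (Python) =====
-- def renumPart(p):
--    C = {}; q = []
--    for a in p:
--       r = []
--       for (sa,fa,ca) in a:
--          if not(ca in C): C[ca] = 1+len(C)
--          r.append((sa,fa,C[ca]))
--       q.append(r)
--    return(q)
-- ===== SOURCE B (Python) =====
-- def renumPart(p):
--    # No incremental relabeling table at all: the new id of a cluster label c is a
--    # closed form over the flattened label sequence -- the number of DISTINCT labels
--    # in the prefix up to and including c's first occurrence.
--    labels = [t[2] for a in p for t in a]
--    def rank(c):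
--       return len(set(labels[:labels.index(c) + 1]))
--    return [[(s, f, rank(c)) for (s, f, c) in a] for a in p]
-- ===== Notes on version B (the rewrite author's own statement) =====
-- stated objective: alternative
-- what changed: A maintains an incremental relabeling dict while building the output in one interleaved nested loop; B keeps no table at all: it flattens the labels once and computes each new id as a closed form, the number of distinct labels in the flattened prefix up to that label's first occurrence (index + set-of-prefix), then rebuilds the structure by a pure comprehension.
import Mathlib
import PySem

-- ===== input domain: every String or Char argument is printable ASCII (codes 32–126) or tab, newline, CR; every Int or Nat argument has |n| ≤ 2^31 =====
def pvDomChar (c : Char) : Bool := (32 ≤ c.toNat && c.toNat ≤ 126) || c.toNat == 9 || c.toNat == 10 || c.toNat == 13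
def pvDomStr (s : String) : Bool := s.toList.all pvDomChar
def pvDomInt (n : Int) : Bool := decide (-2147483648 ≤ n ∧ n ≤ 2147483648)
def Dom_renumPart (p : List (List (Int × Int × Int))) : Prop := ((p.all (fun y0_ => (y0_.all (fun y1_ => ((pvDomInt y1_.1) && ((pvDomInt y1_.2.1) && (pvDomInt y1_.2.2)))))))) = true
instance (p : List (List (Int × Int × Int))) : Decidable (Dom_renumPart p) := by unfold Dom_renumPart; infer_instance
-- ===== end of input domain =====

-- B replaces A's interleaved dict-building loop by a closed-form rank: the new id of a label is the distinct-count of the flattened-label prefix up to its first occurrence (alternative algorithm; slower on big inputs, no table maintained).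


-- ===== PORT A =====
-- Literal transliteration of A's interleaved loop; C[ca] is read right after ca was
-- (if necessary) inserted, so the key is always present and getD _ 0 is exact.
-- A's inner loop body (build r while updating C):
def rpRowF (st2 : PySem.Dict Int Int × List (Int × Int × Int)) (t : Int × Int × Int) :
    PySem.Dict Int Int × List (Int × Int × Int) :=
  let C := if st2.1.contains t.2.2 then st2.1
           else st2.1.insert t.2.2 (1 + (st2.1.size : Int))
  (C, st2.2 ++ [(t.1, t.2.1, C.getD t.2.2 0)])

-- A's outer loop body (process row a, append r to q):
def rpOuterF (st : PySem.Dict Int Int × List (List (Int × Int × Int)))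
    (a : List (Int × Int × Int)) :
    PySem.Dict Int Int × List (List (Int × Int × Int)) :=
  let res := a.foldl rpRowF (st.1, [])
  (res.1, st.2 ++ [res.2])

def renumPart (p : List (List (Int × Int × Int))) : List (List (Int × Int × Int)) :=
  (p.foldl rpOuterF (PySem.Dict.empty, [])).2

-- ===== PORT B =====
-- Source B: labels = the flattened list of third components.
def rpLabels (p : List (List (Int × Int × Int))) : List Int :=
  p.flatMap (fun a => a.map (fun t => t.2.2))

-- Source B's rank(c) = len(set(labels[:labels.index(c) + 1])).
-- labels.index(c) → (index? …).getD 0: exact, c is always a member when rank is called;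
-- labels[:k+1] with the natural k → take (k+1), exact (PySem.List.slice_to_natCast).
def rpRank (labels : List Int) (c : Int) : Int :=
  ((PySem.Set.ofList (labels.take ((PySem.List.index? labels c).getD 0 + 1))).length : Int)

def renumPart_alt (p : List (List (Int × Int × Int))) : List (List (Int × Int × Int)) :=
  let labels := rpLabels p
  p.map (fun a => a.map (fun t => (t.1, t.2.1, rpRank labels t.2.2)))

-- ===== PRECONDITION & SPEC =====
def Spec_renumPart (p : List (List (Int × Int × Int))) (out : List (List (Int × Int × Int))) : Prop := out = renumPart_alt p
instance (p : List (List (Int × Int × Int))) (out : List (List (Int × Int × Int))) : Decidable (Spec_renumPart p out) := by unfold Spec_renumPart; infer_instance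

-- ===== CLAIM (what is proved, stated in full; the proofs are below) =====
def Claim_equal_renumPart : Prop := ∀ (p : List (List (Int × Int × Int))), Dom_renumPart p → Spec_renumPart p (renumPart p)

-- ===== LEMMAS AND PROOFS =====

-- the dict-update step A performs, on a bare label
def rpStepL (C : PySem.Dict Int Int) (c : Int) : PySem.Dict Int Int :=
  if C.contains c then C else C.insert c (1 + (C.size : Int))

-- the same step on a triple (A's literal step)
def rpStep (C : PySem.Dict Int Int) (t : Int × Int × Int) : PySem.Dict Int Int :=
  rpStepL C t.2.2

-- D preserves every binding of C
def RpExt (C D : PySem.Dict Int Int) : Prop := ∀ k v, C.get? k = some v → D.get? k = some v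

lemma rpExt_refl (C : PySem.Dict Int Int) : RpExt C C := fun _ _ h => h

lemma rpExt_trans {C D E : PySem.Dict Int Int} (h1 : RpExt C D) (h2 : RpExt D E) : RpExt C E :=
  fun k v h => h2 k v (h1 k v h)

lemma rpExt_step (C : PySem.Dict Int Int) (t : Int × Int × Int) : RpExt C (rpStep C t) := by
  intro k v h
  unfold rpStep rpStepL
  split_ifs with hc
  · exact h
  · rw [PySem.Dict.get?_insert_of_ne]
    · exact h
    · intro hk
      rw [hk] at h
      rw [PySem.Dict.contains_eq_isSome_get?, h] at hc
      simp at hc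

lemma rpExt_foldl (a : List (Int × Int × Int)) :
    ∀ C, RpExt C (a.foldl rpStep C) := by
  induction a with
  | nil => intro C; exact rpExt_refl C
  | cons t a ih =>
    intro C
    exact rpExt_trans (rpExt_step C t) (ih (rpStep C t))

lemma rpExt_build (p : List (List (Int × Int × Int))) :
    ∀ C, RpExt C (p.foldl (fun C a => a.foldl rpStep C) C) := by
  induction p with
  | nil => intro C; exact rpExt_refl C
  | cons a p ih =>
    intro C
    exact rpExt_trans (rpExt_foldl a C) (ih (a.foldl rpStep C))

lemma rpStep_contains_self (C : PySem.Dict Int Int) (t : Int × Int × Int) :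
    (rpStep C t).contains t.2.2 = true := by
  unfold rpStep rpStepL
  split_ifs with hc
  · exact hc
  · exact PySem.Dict.contains_insert_self _ _ _

lemma rp_getD_ext {C D : PySem.Dict Int Int} (h : RpExt C D) {k : Int}
    (hk : C.contains k = true) : D.getD k 0 = C.getD k 0 := by
  rw [PySem.Dict.contains_eq_isSome_get?] at hk
  obtain ⟨v, hv⟩ := Option.isSome_iff_exists.mp hk
  rw [PySem.Dict.getD_eq_get?_getD, PySem.Dict.getD_eq_get?_getD, hv, h k v hv]

-- A's inner loop = (dict chained by rpStep, mapped row under any extension D of the final row dict)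
lemma rp_row (a : List (Int × Int × Int)) :
    ∀ (C : PySem.Dict Int Int) (r : List (Int × Int × Int)) (D : PySem.Dict Int Int),
      RpExt (a.foldl rpStep C) D →
      a.foldl rpRowF (C, r)
      = (a.foldl rpStep C, r ++ a.map (fun t => (t.1, t.2.1, D.getD t.2.2 0))) := by
  induction a with
  | nil => intro C r D _; simp
  | cons t a ih =>
    intro C r D hD
    have hstep : RpExt (a.foldl rpStep (rpStep C t)) D := hD
    have hval : (rpStep C t).getD t.2.2 0 = D.getD t.2.2 0 := by
      have h1 : RpExt (rpStep C t) D :=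
        rpExt_trans (rpExt_foldl a (rpStep C t)) hstep
      exact (rp_getD_ext h1 (rpStep_contains_self C t)).symm
    have e : rpRowF (C, r) t = (rpStep C t, r ++ [(t.1, t.2.1, (rpStep C t).getD t.2.2 0)]) := rfl
    rw [List.foldl_cons, e, ih (rpStep C t) _ D hstep, hval]
    simp

-- A's outer loop = (dict chained rows, rows mapped under any extension D of the final dict)
lemma rp_top (p : List (List (Int × Int × Int))) :
    ∀ (C : PySem.Dict Int Int) (q : List (List (Int × Int × Int))) (D : PySem.Dict Int Int),
      RpExt (p.foldl (fun C a => a.foldl rpStep C) C) D →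
      p.foldl rpOuterF (C, q)
      = (p.foldl (fun C a => a.foldl rpStep C) C,
         q ++ p.map (fun a => a.map (fun t => (t.1, t.2.1, D.getD t.2.2 0)))) := by
  induction p with
  | nil => intro C q D _; simp
  | cons a p ih =>
    intro C q D hD
    have hrowExt : RpExt (a.foldl rpStep C) D :=
      rpExt_trans (rpExt_build p (a.foldl rpStep C)) hD
    have e : rpOuterF (C, q) a
        = ((a.foldl rpRowF (C, [])).1, q ++ [(a.foldl rpRowF (C, [])).2]) := rfl
    rw [List.foldl_cons, e, rp_row a C [] D hrowExt]
    simp only [List.nil_append]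
    rw [ih (a.foldl rpStep C) _ D hD]
    simp

-- A's nested dict fold is the flat fold over the flattened labels
lemma rp_fold_flat (p : List (List (Int × Int × Int))) :
    ∀ C, p.foldl (fun C a => a.foldl rpStep C) C = (rpLabels p).foldl rpStepL C := by
  induction p with
  | nil => intro C; simp [rpLabels]
  | cons a p ih =>
    intro C
    simp only [rpLabels, List.flatMap_cons, List.foldl_append, List.foldl_cons, List.foldl_map]
    rw [ih]
    rfl

-- characterisation of the flat fold: contains = membership, size = distinct count,
-- and the stored value at c is B's closed-form rank
lemma rpStepL_of_contains {C : PySem.Dict Int Int} {c : Int} (h : C.contains c = true) :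
    rpStepL C c = C := by
  unfold rpStepL; rw [h]; simp

lemma rpStepL_of_not_contains {C : PySem.Dict Int Int} {c : Int} (h : C.contains c = false) :
    rpStepL C c = C.insert c (1 + (C.size : Int)) := by
  unfold rpStepL; rw [h]; simp

lemma rp_ofList_append_mem (xs : List Int) (t : Int) (ht : t ∈ xs) :
    PySem.Set.ofList (xs ++ [t]) = PySem.Set.ofList xs := by
  rw [PySem.Set.ofList_eq_foldl, List.foldl_append, ← PySem.Set.ofList_eq_foldl]
  simp [PySem.Set.add, PySem.Set.contains, (PySem.Set.mem_ofList xs t).mpr ht]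

lemma rp_ofList_append_not_mem (xs : List Int) (t : Int) (ht : t ∉ xs) :
    PySem.Set.ofList (xs ++ [t]) = PySem.Set.ofList xs ++ [t] := by
  rw [PySem.Set.ofList_eq_foldl, List.foldl_append, ← PySem.Set.ofList_eq_foldl]
  simp [PySem.Set.add, PySem.Set.contains]
  intro hm
  exact absurd hm ht

lemma rp_flat_spec (xs : List Int) :
    ((xs.foldl rpStepL PySem.Dict.empty).size = (PySem.Set.ofList xs).length)
    ∧ (∀ c, (xs.foldl rpStepL PySem.Dict.empty).contains c = decide (c ∈ xs))
    ∧ (∀ c k, PySem.List.index? xs c = some k →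
        (xs.foldl rpStepL PySem.Dict.empty).get? c
          = some ((PySem.Set.ofList (xs.take (k + 1))).length : Int)) := by
  induction xs using List.reverseRecOn with
  | nil =>
    refine ⟨by simp [PySem.Set.ofList], by simp, ?_⟩
    intro c k h
    simp [PySem.List.index?_eq_idxOf?] at h
  | append_singleton xs t ih =>
    obtain ⟨hsize, hcont, hval⟩ := ih
    have hfold : (xs ++ [t]).foldl rpStepL PySem.Dict.empty
        = rpStepL (xs.foldl rpStepL PySem.Dict.empty) t := by
      rw [List.foldl_append, List.foldl_cons, List.foldl_nil]
    by_cases ht : t ∈ xs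
    · have hc : rpStepL (xs.foldl rpStepL PySem.Dict.empty) t
          = xs.foldl rpStepL PySem.Dict.empty :=
        rpStepL_of_contains (by rw [hcont t]; simp [ht])
      rw [hfold, hc]
      refine ⟨?_, ?_, ?_⟩
      · rw [hsize, rp_ofList_append_mem xs t ht]
      · intro c
        rw [hcont c]
        by_cases hc2 : c = t
        · simp [hc2, ht]
        · simp [List.mem_append, hc2]
      · intro c k hk
        have hcm : c ∈ xs := by
          have hm : c ∈ xs ++ [t] :=
            (PySem.List.index?_isSome_iff _ _).mp (by rw [hk]; rfl)
          rcases List.mem_append.mp hm with h | h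
          · exact h
          · have hct : c = t := by simpa using h
            exact hct ▸ ht
        rw [PySem.List.index?_append_of_mem _ hcm] at hk
        obtain ⟨hlt, -, -⟩ := PySem.List.getElem_of_index?_eq_some hk
        rw [List.take_append_of_le_length (by omega)]
        exact hval c k hk
    · have hc : rpStepL (xs.foldl rpStepL PySem.Dict.empty) t
          = (xs.foldl rpStepL PySem.Dict.empty).insert t
              (1 + ((xs.foldl rpStepL PySem.Dict.empty).size : Int)) :=
        rpStepL_of_not_contains (by rw [hcont t]; simp [ht])
      have hofl := rp_ofList_append_not_mem xs t ht
      rw [hfold, hc]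
      refine ⟨?_, ?_, ?_⟩
      · rw [PySem.Dict.size_insert]
        rw [hcont t]
        simp [ht, hofl, hsize]
      · intro c
        rw [PySem.Dict.contains_insert, hcont c]
        by_cases hc2 : c = t
        · simp [hc2]
        · simp [hc2]
      · intro c k hk
        by_cases hc2 : c = t
        · subst hc2
          rw [PySem.List.index?_append_singleton_self xs c ht] at hk
          obtain rfl : k = xs.length := by injection hk with h; omega
          rw [PySem.Dict.get?_insert_self]
          have htake : (xs ++ [c]).take (xs.length + 1) = xs ++ [c] := by
            apply List.take_of_length_le; simp
          rw [htake, hofl, hsize]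
          congr 1
          simp only [List.length_append, List.length_cons, List.length_nil]
          push_cast
          ring
        · have hcm : c ∈ xs := by
            have hm : c ∈ xs ++ [t] :=
              (PySem.List.index?_isSome_iff _ _).mp (by rw [hk]; rfl)
            rcases List.mem_append.mp hm with h | h
            · exact h
            · exact absurd (by simpa using h) hc2
          rw [PySem.Dict.get?_insert_of_ne _ _ hc2]
          rw [PySem.List.index?_append_of_mem _ hcm] at hk
          obtain ⟨hlt, -, -⟩ := PySem.List.getElem_of_index?_eq_some hk
          rw [List.take_append_of_le_length (by omega)]
          exact hval c k hk

-- for a label occurring in p, the final dict's value is B's rank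
lemma rp_getD_eq_rank (p : List (List (Int × Int × Int))) (c : Int) (hc : c ∈ rpLabels p) :
    (p.foldl (fun C a => a.foldl rpStep C) PySem.Dict.empty).getD c 0 = rpRank (rpLabels p) c := by
  rw [rp_fold_flat]
  obtain ⟨k, hk⟩ := Option.isSome_iff_exists.mp
    ((PySem.List.index?_isSome_iff _ _).mpr hc)
  obtain ⟨_, _, hval⟩ := rp_flat_spec (rpLabels p)
  rw [PySem.Dict.getD_eq_get?_getD, hval c k hk, rpRank, hk]
  rfl

-- ===== VERDICT (by name: the statement is the Claim_ definition above) =====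
theorem renumPart_spec : Claim_equal_renumPart := by
  intro p _
  unfold Spec_renumPart renumPart renumPart_alt
  rw [rp_top p PySem.Dict.empty []
        (p.foldl (fun C a => a.foldl rpStep C) PySem.Dict.empty) (rpExt_refl _)]
  simp only [List.nil_append]
  apply List.map_congr_left
  intro a ha
  apply List.map_congr_left
  intro t ht
  have hmem : t.2.2 ∈ rpLabels p := by
    simp only [rpLabels, List.mem_flatMap]
    exact ⟨a, ha, List.mem_map.mpr ⟨t, ht, rfl⟩⟩
  rw [rp_getD_eq_rank p t.2.2 hmem]
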